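-- pv_equiv track=rewrite | github.com/suxinwei/crawler | poker_test.py | poker_point
-- ===== SOURCE A (Python) =====
-- def poker_point(poker):
--     length = len(poker)
--     for i in range(length):
--         for j in range(i + 1, length):
--             for k in range(j + 1, length):
--                 _sum = poker[i] + poker[j] + poker[k]
--                 if _sum % 10 == 0:
--                     if sum(poker) - _sum > 10:
--                         return sum(poker) % 10
--                     else:
--                         return sum(poker) - _sum
-- ===== SOURCE B (Python) =====
-- def poker_point(poker):
--     n = len(poker)
--     total = sum(poker)
--     # nxt[j] is a 10-slot table: nxt[j][r] = smallest index k > j with poker[k] % 10 == r (None if absent)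
--     nxt = []
--     cur = [None] * 10
--     for j in range(n - 1, -1, -1):
--         nxt.append(cur)
--         cur = cur[:]
--         cur[poker[j] % 10] = j
--     nxt.reverse()
--     for i in range(n):
--         for j in range(i + 1, n):
--             r = (-(poker[i] + poker[j])) % 10
--             k = nxt[j][r]
--             if k is not None:
--                 s = poker[i] + poker[j] + poker[k]
--                 if total - s > 10:
--                     return total % 10
--                 return total - s
--     return None
-- ===== Notes on version B (the rewrite author's own statement) =====
-- stated objective: faster
-- what changed: Replaced the cubic scan over all triples (i,j,k) by a backward pass that precomputes, for every position j and residue r, the smallest index k>j with poker[k]%10==r, so the search becomes a pair scan with an O(1) table lookup instead of an inner k-loop.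
import Mathlib
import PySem

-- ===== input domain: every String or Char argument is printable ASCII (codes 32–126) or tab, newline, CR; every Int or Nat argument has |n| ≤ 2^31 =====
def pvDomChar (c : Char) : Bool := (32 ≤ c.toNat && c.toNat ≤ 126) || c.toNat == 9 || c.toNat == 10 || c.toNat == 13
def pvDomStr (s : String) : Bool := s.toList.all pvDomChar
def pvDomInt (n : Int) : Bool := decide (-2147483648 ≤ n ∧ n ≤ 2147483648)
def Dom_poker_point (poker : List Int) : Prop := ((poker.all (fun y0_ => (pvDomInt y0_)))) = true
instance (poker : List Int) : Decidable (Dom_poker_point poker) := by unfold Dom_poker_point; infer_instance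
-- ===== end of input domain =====

-- B replaces A's cubic triple scan by a precomputed next-index-per-residue table and a pair scan.

-- ===== PORT A =====
def poker_point (poker : List Int) : Option Int :=
  let length := (poker.length : Int)
  (PySem.List.pyRange 0 length 1).findSome? (fun i =>
    (PySem.List.pyRange (i + 1) length 1).findSome? (fun j =>
      (PySem.List.pyRange (j + 1) length 1).findSome? (fun k =>
        let s := PySem.List.pyGetD poker i 0 + PySem.List.pyGetD poker j 0 +
                 PySem.List.pyGetD poker k 0
        if PySem.Int.mod s 10 = 0 then
          some (if poker.sum - s > 10 then PySem.Int.mod poker.sum 10 else poker.sum - s)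
        else none)))

-- ===== PORT B =====
def poker_point_alt (poker : List Int) : Option Int :=
  let n := (poker.length : Int)
  let total := poker.sum
  -- backward pass: after it, nxt[j][r] = smallest index k > j with poker[k] % 10 == r
  let st := (PySem.List.pyRange (n - 1) (-1) (-1)).foldl
      (fun (st : List (List (Option Int)) × List (Option Int)) j =>
        (st.1 ++ [st.2],
         st.2.set (PySem.Int.mod (PySem.List.pyGetD poker j 0) 10).toNat (some j)))
      ([], List.replicate 10 none)
  let nxt := st.1.reverse
  (PySem.List.pyRange 0 n 1).findSome? (fun i =>
    (PySem.List.pyRange (i + 1) n 1).findSome? (fun j =>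
      let r := PySem.Int.mod (-(PySem.List.pyGetD poker i 0 + PySem.List.pyGetD poker j 0)) 10
      match PySem.List.pyGetD (PySem.List.pyGetD nxt j []) r none with
      | none => none
      | some k =>
        let s := PySem.List.pyGetD poker i 0 + PySem.List.pyGetD poker j 0 +
                 PySem.List.pyGetD poker k 0
        if total - s > 10 then some (PySem.Int.mod total 10) else some (total - s)))

-- ===== PRECONDITION & SPEC =====
def Spec_poker_point (poker : List Int) (out : Option Int) : Prop := out = poker_point_alt poker
instance (poker : List Int) (out : Option Int) : Decidable (Spec_poker_point poker out) := by unfold Spec_poker_point; infer_instance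

-- ===== CLAIM (what is proved, stated in full; the proofs are below) =====
def Claim_equal_poker_point : Prop := ∀ (poker : List Int), Dom_poker_point poker → Spec_poker_point poker (poker_point poker)

-- ===== LEMMAS AND PROOFS =====

-- congruence for findSome? (pointwise-equal bodies on the list's members)
theorem findSome?_ext {α β : Type} (l : List α) (f g : α → Option β)
    (h : ∀ x ∈ l, f x = g x) : l.findSome? f = l.findSome? g := by
  induction l with
  | nil => rfl
  | cons a l ih =>
    rw [List.findSome?_cons, List.findSome?_cons, h a (List.mem_cons_self),
        ih (fun x hx => h x (List.mem_cons_of_mem a hx))]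

-- rowAt poker t = the residue table for the suffix of indices ≥ t (proof-side spec of B's cur)
def rowAt (poker : List Int) (t : Nat) : List (Option Int) :=
  if h : t < poker.length then
    (rowAt poker (t + 1)).set (PySem.Int.mod poker[t] 10).toNat (some (t : Int))
  else List.replicate 10 none
termination_by poker.length - t

theorem length_rowAt (poker : List Int) (t : Nat) : (rowAt poker t).length = 10 := by
  unfold rowAt
  split
  · rw [List.length_set, length_rowAt poker (t + 1)]
  · simp
termination_by poker.length - t

-- B's backward fold computes exactly the rowAt tables
theorem pokerF_fold (poker : List Int) (d m : Nat) (hm : m + d = poker.length) :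
    (PySem.List.pyRange (m : Int) (poker.length : Int) 1).reverse.foldl
      (fun (st : List (List (Option Int)) × List (Option Int)) j =>
        (st.1 ++ [st.2],
         st.2.set (PySem.Int.mod (PySem.List.pyGetD poker j 0) 10).toNat (some j)))
      ([], List.replicate 10 none)
    = ((List.range' (m + 1) (poker.length - m)).reverse.map (rowAt poker), rowAt poker m) := by
  induction d generalizing m with
  | zero =>
    have hm' : m = poker.length := by omega
    subst hm'
    rw [PySem.List.pyRange_one_eq_nil (le_refl _)]
    simp only [List.reverse_nil, List.foldl_nil, Nat.sub_self, List.range'_zero,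
      List.map_nil]
    rw [rowAt]
    simp
  | succ d ih =>
    have hlt : m < poker.length := by omega
    rw [PySem.List.pyRange_one_cons (by exact_mod_cast hlt), List.reverse_cons,
        List.foldl_append]
    have : ((m : Int) + 1) = ((m + 1 : Nat) : Int) := by push_cast; ring
    rw [this, ih (m + 1) (by omega)]
    simp only [List.foldl_cons, List.foldl_nil]
    have hget : PySem.List.pyGetD poker (m : Int) 0 = poker[m] := by
      simp [PySem.List.pyGetD_natCast, hlt]
    have hrow : rowAt poker m
        = (rowAt poker (m + 1)).set (PySem.Int.mod poker[m] 10).toNat (some (m : Int)) := by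
      rw [rowAt]; rw [dif_pos hlt]
    have hrange : poker.length - m = (poker.length - (m + 1)) + 1 := by omega
    rw [hrange, List.range'_succ, List.reverse_cons, List.map_append]
    simp [hget, hrow]
-- A's innermost k-loop equals a single lookup in the rowAt table
theorem inner_loop (poker : List Int) (c : Int) (d t : Nat) (ht : t + d = poker.length) :
    (PySem.List.pyRange (t : Int) (poker.length : Int) 1).findSome? (fun k =>
        let s := c + PySem.List.pyGetD poker k 0
        if PySem.Int.mod s 10 = 0 then
          some (if poker.sum - s > 10 then PySem.Int.mod poker.sum 10 else poker.sum - s)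
        else none)
    = match (rowAt poker t).getD (PySem.Int.mod (-c) 10).toNat none with
      | none => none
      | some k =>
        let s := c + PySem.List.pyGetD poker k 0
        some (if poker.sum - s > 10 then PySem.Int.mod poker.sum 10 else poker.sum - s) := by
  induction d generalizing t with
  | zero =>
    have hm' : t = poker.length := by omega
    subst hm'
    rw [PySem.List.pyRange_one_eq_nil (le_refl _), rowAt,
        dif_neg (by omega : ¬ poker.length < poker.length)]
    have h10 : (PySem.Int.mod (-c) 10).toNat < 10 := by
      have h1 := PySem.Int.mod_nonneg (-c) (by norm_num : (0:Int) < 10)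
      have h2 := PySem.Int.mod_lt (-c) (by norm_num : (0:Int) < 10)
      omega
    rw [List.getD, List.getElem?_replicate, if_pos h10]
    rfl
  | succ d ih =>
    have hlt : t < poker.length := by omega
    have hget : PySem.List.pyGetD poker (t : Int) 0 = poker[t] := by
      simp [PySem.List.pyGetD_natCast, hlt]
    rw [PySem.List.pyRange_one_cons (by exact_mod_cast hlt), List.findSome?_cons]
    have hrw : rowAt poker t
        = (rowAt poker (t + 1)).set (PySem.Int.mod poker[t] 10).toNat (some (t : Int)) := by
      rw [rowAt]; rw [dif_pos hlt]
    have hr0 : (0 : Int) ≤ PySem.Int.mod (-c) 10 := PySem.Int.mod_nonneg _ (by norm_num)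
    have hr10 : PySem.Int.mod (-c) 10 < 10 := PySem.Int.mod_lt _ (by norm_num)
    have hlen := length_rowAt poker (t + 1)
    by_cases hc : PySem.Int.mod (c + poker[t]) 10 = 0
    · -- hit at index t: the residue of poker[t] is exactly the searched slot
      have hslot : (PySem.Int.mod poker[t] 10).toNat = (PySem.Int.mod (-c) 10).toNat := by
        rw [PySem.Int.mod_eq_emod_of_pos (a := poker[t]) (by norm_num),
            PySem.Int.mod_eq_emod_of_pos (a := -c) (by norm_num)]
        rw [PySem.Int.mod_eq_emod_of_pos (by norm_num)] at hc
        omega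
      rw [hrw, hslot]
      have : ((rowAt poker (t + 1)).set (PySem.Int.mod (-c) 10).toNat
          (some (t : Int))).getD (PySem.Int.mod (-c) 10).toNat none = some (t : Int) := by
        rw [List.getD, List.getElem?_set_self (by rw [hlen]; omega)]
        rfl
      rw [this]
      simp only [hget, hc, if_pos]
    · -- miss at index t: the slot is untouched, recurse on the suffix
      have hslot : (PySem.Int.mod poker[t] 10).toNat ≠ (PySem.Int.mod (-c) 10).toNat := by
        intro h
        apply hc
        have h1 : (0 : Int) ≤ PySem.Int.mod poker[t] 10 := PySem.Int.mod_nonneg _ (by norm_num)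
        rw [PySem.Int.mod_eq_emod_of_pos (a := poker[t]) (by norm_num),
            PySem.Int.mod_eq_emod_of_pos (a := -c) (by norm_num)] at h
        rw [PySem.Int.mod_eq_emod_of_pos (by norm_num)] at h1 ⊢
        omega
      have huntouched : ((rowAt poker (t + 1)).set (PySem.Int.mod poker[t] 10).toNat
          (some (t : Int))).getD (PySem.Int.mod (-c) 10).toNat none
          = (rowAt poker (t + 1)).getD (PySem.Int.mod (-c) 10).toNat none := by
        rw [List.getD, List.getD, List.getElem?_set_ne hslot]
      have hcast : ((t : Int) + 1) = ((t + 1 : Nat) : Int) := by push_cast; ring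
      rw [hrw, huntouched, hget]
      simp only [hc, if_neg, not_false_iff]
      rw [hcast, ih (t + 1) (by omega)]

-- ===== VERDICT (by name: the statement is the Claim_ definition above) =====
theorem poker_point_spec : Claim_equal_poker_point := by
  intro poker _hdom
  unfold Spec_poker_point poker_point poker_point_alt
  simp only []
  -- the backward-built table
  have hfold := pokerF_fold poker poker.length 0 (by omega)
  simp only [Nat.cast_zero, Nat.sub_zero, Nat.zero_add] at hfold
  rw [show PySem.List.pyRange ((poker.length : Int) - 1) (-1) (-1)
        = (PySem.List.pyRange 0 (poker.length : Int) 1).reverse by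
      rw [PySem.List.pyRange_neg_one_eq_reverse]; norm_num]
  rw [hfold]
  simp only [List.map_reverse, List.reverse_reverse]
  apply findSome?_ext
  intro i hi
  apply findSome?_ext
  intro j hj
  have hi' := (PySem.List.mem_pyRange_one).mp hi
  have hj' := (PySem.List.mem_pyRange_one).mp hj
  have hj0 : (0 : Int) ≤ j := by omega
  have hjlen : j < (poker.length : Int) := hj'.2
  -- nxt[j] = rowAt (j.toNat + 1)
  have hjcast : j = ((j.toNat : Nat) : Int) := by omega
  have hjn : j.toNat < poker.length := by omega
  have hnxt : PySem.List.pyGetD ((List.range' 1 poker.length).map (rowAt poker)) j []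
      = rowAt poker (j.toNat + 1) := by
    rw [hjcast, PySem.List.pyGetD_natCast, List.getD_eq_getElem _ _
        (by simpa using hjn), List.getElem_map, List.getElem_range']
    congr 1
    omega
  rw [hnxt]
  set c := PySem.List.pyGetD poker i 0 + PySem.List.pyGetD poker j 0 with hc
  have hr0 : (0 : Int) ≤ PySem.Int.mod (-c) 10 := PySem.Int.mod_nonneg _ (by norm_num)
  have hr10 : PySem.Int.mod (-c) 10 < 10 := PySem.Int.mod_lt _ (by norm_num)
  have hrowlen := length_rowAt poker (j.toNat + 1)
  have hrowget : PySem.List.pyGetD (rowAt poker (j.toNat + 1)) (PySem.Int.mod (-c) 10) none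
      = (rowAt poker (j.toNat + 1)).getD (PySem.Int.mod (-c) 10).toNat none := by
    rw [show PySem.Int.mod (-c) 10 = ((PySem.Int.mod (-c) 10).toNat : Int) by omega,
        PySem.List.pyGetD_natCast, Int.toNat_natCast]
  rw [hrowget]
  have hcast2 : j + 1 = ((j.toNat + 1 : Nat) : Int) := by omega
  rw [hcast2, inner_loop poker c (poker.length - (j.toNat + 1)) (j.toNat + 1) (by omega)]
  cases hrow : (rowAt poker (j.toNat + 1)).getD (PySem.Int.mod (-c) 10).toNat none with
  | none => rfl
  | some k =>
    simp only []
    rw [apply_ite some]
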